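-- pv_equiv track=rewrite | github.com/charlieyang1557/btc-alpha-pipeline | scripts/run_d7_stage2d_batch.py | _compute_label_counts
-- ===== SOURCE A (Python) =====
-- def _compute_label_counts(candidates: list[dict]) -> dict[str, int]:
--     """Pre-registered label histogram using Stage 2d ``universe_b_label``.
--
--     Buckets are fixed ``{agreement_expected, divergence_expected, neutral}``
--     to preserve Stage 2c consumer shape. Per ChatGPT Round 2 ruling, the
--     skipped-source record (pos 116) carries ``universe_b_label = None``
--     and is intentionally NOT folded into ``neutral``: the null bucket
--     falls through the ``if label in counts`` filter so the sum is 199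
--     (not 200). Pos 116's absence is implicit in the 3-key shape.
--     """
--     counts: dict[str, int] = {
--         "agreement_expected": 0,
--         "divergence_expected": 0,
--         "neutral": 0,
--     }
--     for c in candidates:
--         label = c.get("universe_b_label")
--         if label in counts:
--             counts[label] += 1
--     return counts
-- ===== SOURCE B (Python) =====
-- def _compute_label_counts(candidates: list[dict]) -> dict[str, int]:
--     return {
--         k: sum(1 for c in candidates if c.get("universe_b_label") == k)
--         for k in ("agreement_expected", "divergence_expected", "neutral")
--     }
-- ===== Notes on version B (the rewrite author's own statement) =====
-- stated objective: alternative
-- what changed: A makes one pass maintaining a mutable dict with membership tests and in-place increments; B is a dict comprehension over the three fixed keys, each value an independent filtered count of the candidates.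
import Mathlib
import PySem

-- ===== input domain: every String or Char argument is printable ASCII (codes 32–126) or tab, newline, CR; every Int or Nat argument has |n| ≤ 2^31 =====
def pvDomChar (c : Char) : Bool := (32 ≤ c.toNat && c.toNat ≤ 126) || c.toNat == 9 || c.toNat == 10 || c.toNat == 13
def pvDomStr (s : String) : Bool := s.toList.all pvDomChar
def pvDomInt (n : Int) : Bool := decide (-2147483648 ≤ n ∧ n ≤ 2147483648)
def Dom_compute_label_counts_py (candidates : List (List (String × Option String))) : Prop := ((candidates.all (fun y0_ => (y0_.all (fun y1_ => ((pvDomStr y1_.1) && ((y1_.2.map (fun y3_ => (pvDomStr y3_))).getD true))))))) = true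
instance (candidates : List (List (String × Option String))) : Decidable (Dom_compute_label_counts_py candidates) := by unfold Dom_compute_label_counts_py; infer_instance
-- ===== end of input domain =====

-- B replaces A's single pass over a mutable counts dict by a comprehension over the
-- three fixed keys, each value an independent filtered count (alternative decomposition).


-- ===== PORT A =====
-- c.get("universe_b_label"): dict lookup returning None when the key is absent
def pvGetLabel (c : List (String × Option String)) : Option String :=
  ((PySem.Dict.ofList c).get? "universe_b_label").getD none

def pvStepA (d : PySem.Dict String Int) (c : List (String × Option String)) :
    PySem.Dict String Int :=
  let label := pvGetLabel c
  match label with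
  | some l => if d.contains l then d.modify l 0 (· + 1) else d
  | none => d

def compute_label_counts_py (candidates : List (List (String × Option String))) : List (String × Int) :=
  let counts : PySem.Dict String Int :=
    PySem.Dict.ofList [("agreement_expected", 0), ("divergence_expected", 0), ("neutral", 0)]
  (candidates.foldl pvStepA counts).items

-- ===== PORT B =====
def compute_label_counts_py_alt (candidates : List (List (String × Option String))) : List (String × Int) :=
  ["agreement_expected", "divergence_expected", "neutral"].map (fun k =>
    (k, ((candidates.map (fun c => if pvGetLabel c == some k then (1 : Int) else 0)).sum)))

-- ===== PRECONDITION & SPEC =====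
def Spec_compute_label_counts_py (candidates : List (List (String × Option String))) (out : List (String × Int)) : Prop := out = compute_label_counts_py_alt candidates
instance (candidates : List (List (String × Option String))) (out : List (String × Int)) : Decidable (Spec_compute_label_counts_py candidates out) := by unfold Spec_compute_label_counts_py; infer_instance

-- ===== CLAIM (what is proved, stated in full; the proofs are below) =====
def Claim_equal_compute_label_counts_py : Prop := ∀ (candidates : List (List (String × Option String))), Dom_compute_label_counts_py candidates → Spec_compute_label_counts_py candidates (compute_label_counts_py candidates)

-- ===== LEMMAS AND PROOFS =====

-- one 0/1 count, as B computes it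
def pvCnt (k : String) (cs : List (List (String × Option String))) : Int :=
  (cs.map (fun c => if pvGetLabel c == some k then (1 : Int) else 0)).sum

theorem pvFold_inv (cs : List (List (String × Option String))) (a d n : Int) :
    cs.foldl pvStepA (PySem.Dict.mk
      [("agreement_expected", a), ("divergence_expected", d), ("neutral", n)]) =
    PySem.Dict.mk
      [("agreement_expected", a + pvCnt "agreement_expected" cs),
       ("divergence_expected", d + pvCnt "divergence_expected" cs),
       ("neutral", n + pvCnt "neutral" cs)] := by
  induction cs generalizing a d n with
  | nil => simp [pvCnt]
  | cons c cs ih =>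
    simp only [List.foldl_cons]
    rcases hl : pvGetLabel c with _ | l
    · simp only [pvStepA, hl]
      rw [ih]
      simp [pvCnt, hl]
    · by_cases h1 : l = "agreement_expected"
      · subst h1
        simp only [pvStepA, hl]
        norm_num [PySem.Dict.contains, PySem.Dict.modify, PySem.Dict.get?, PySem.Dict.getD,
          PySem.Dict.insert]
        simp only [String.reduceEq, reduceIte]
        rw [ih]
        simp [pvCnt, hl]
        ring
      · by_cases h2 : l = "divergence_expected"
        · subst h2
          simp only [pvStepA, hl]
          norm_num [PySem.Dict.contains, PySem.Dict.modify, PySem.Dict.get?, PySem.Dict.getD,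
            PySem.Dict.insert]
          simp only [String.reduceEq, reduceIte]
          rw [ih]
          simp [pvCnt, hl]
          ring
        · by_cases h3 : l = "neutral"
          · subst h3
            simp only [pvStepA, hl]
            norm_num [PySem.Dict.contains, PySem.Dict.modify, PySem.Dict.get?, PySem.Dict.getD,
              PySem.Dict.insert]
            simp only [String.reduceEq, reduceIte]
            rw [ih]
            simp [pvCnt, hl]
            ring
          · simp only [pvStepA, hl]
            have hcontains : (PySem.Dict.mk
                [("agreement_expected", a), ("divergence_expected", d), ("neutral", n)]).contains l = false := by
              simp [PySem.Dict.contains]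
              refine ⟨fun h => ?_, fun h => ?_, fun h => ?_⟩ <;> simp_all
            rw [hcontains]
            simp only [if_neg Bool.false_ne_true]
            rw [ih]
            simp [pvCnt, hl]
            refine ⟨fun h => ?_, fun h => ?_, fun h => ?_⟩ <;> simp_all

-- ===== VERDICT (by name: the statement is the Claim_ definition above) =====
theorem compute_label_counts_py_spec : Claim_equal_compute_label_counts_py := by
  intro cs _
  show compute_label_counts_py cs = compute_label_counts_py_alt cs
  have h : compute_label_counts_py cs = (cs.foldl pvStepA (PySem.Dict.mk
      [("agreement_expected", 0), ("divergence_expected", 0), ("neutral", 0)])).items := rfl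
  rw [h, pvFold_inv]
  simp [compute_label_counts_py_alt, pvCnt]
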